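-- pv_equiv track=rewrite | github.com/ttttong/BERT-BILSTM-GCN-CRF-for-NER | aux1/__init__.py | bin_data_into_buckets
-- ===== SOURCE A (Python) =====
-- def get_chunks(l, n):
--     return [l[i:i + n] for i in range(0, len(l), n)]
--
-- def bin_data_into_buckets(data, batch_size):
--     buckets = []
--     size_to_data_dict = {}
--     for item in data:
--         sequence = item[0]
--         length = len(sequence)
--         try:
--             size_to_data_dict[length].append(item)
--         except:
--             size_to_data_dict[length] = [item]
--     for key in size_to_data_dict.keys():
--         data = size_to_data_dict[key]
--         chunks = get_chunks(data, batch_size)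
--         for chunk in chunks:
--             buckets.append(chunk)
--     return buckets
-- ===== SOURCE B (Python) =====
-- def bin_data_into_buckets(data, batch_size):
--     # Pass 1: distinct sequence lengths in first-appearance order.
--     seen = set()
--     order = []
--     for item in data:
--         length = len(item[0])
--         if length not in seen:
--             seen.add(length)
--             order.append(length)
--     # Pass 2: for each length, filter its group and chunk it.
--     buckets = []
--     for length in order:
--         group = [item for item in data if len(item[0]) == length]
--         for i in range(0, len(group), batch_size):
--             buckets.append(group[i:i + batch_size])
--     return buckets
-- ===== Notes on version B (the rewrite author's own statement) =====
-- stated objective: alternative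
-- what changed: Replaces the single-pass dict index (try/except grouping then concatenating per-key chunks) by a two-pass scheme: first collect the distinct sequence lengths in first-appearance order, then for each length build its group by filtering the data and chunk it directly.
import Mathlib
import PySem

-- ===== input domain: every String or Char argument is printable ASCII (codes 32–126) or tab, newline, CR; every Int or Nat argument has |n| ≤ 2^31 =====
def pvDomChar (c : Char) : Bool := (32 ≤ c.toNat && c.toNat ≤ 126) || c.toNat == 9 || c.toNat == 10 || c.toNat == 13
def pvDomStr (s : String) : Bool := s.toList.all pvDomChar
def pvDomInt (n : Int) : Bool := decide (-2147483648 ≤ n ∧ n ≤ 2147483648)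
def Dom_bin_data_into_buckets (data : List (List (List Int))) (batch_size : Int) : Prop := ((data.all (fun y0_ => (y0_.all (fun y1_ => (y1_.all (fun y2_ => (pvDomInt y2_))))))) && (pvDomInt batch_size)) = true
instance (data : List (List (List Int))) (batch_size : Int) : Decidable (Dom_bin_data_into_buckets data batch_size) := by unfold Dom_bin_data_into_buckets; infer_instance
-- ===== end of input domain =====

-- B replaces A's single-pass dict grouping by a distinct-lengths pass plus per-length filtering; alternative decomposition, same output.


-- ===== PORT A =====
-- len(item[0]) : shared by both ports' source line 'length = len(item[0])';
-- pyGet? is none only for item = [], which Pre_ excludes (Python raises IndexError there).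
def pvKey (item : List (List Int)) : Int :=
  (((PySem.List.pyGet? item 0).getD []).length : Int)

-- get_chunks(l, n) = [l[i:i+n] for i in range(0, len(l), n)]
def pvGetChunks (l : List (List (List Int))) (n : Int) : List (List (List (List Int))) :=
  (PySem.List.pyRange 0 (l.length : Int) n).map
    (fun i => PySem.List.slice l (some i) (some (i + n)))

-- the body of A's first loop: try append / except new singleton
def pvStep (d : PySem.Dict Int (List (List (List Int)))) (item : List (List Int)) : PySem.Dict Int (List (List (List Int))) :=
  match d.get? (pvKey item) with
  | some xs => d.insert (pvKey item) (xs ++ [item])   -- size_to_data_dict[length].append(item)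
  | none    => d.insert (pvKey item) [item]           -- size_to_data_dict[length] = [item]

def bin_data_into_buckets (data : List (List (List Int))) (batch_size : Int) : List (List (List (List Int))) :=
  let d := data.foldl pvStep PySem.Dict.empty
  -- second loop: for key in keys: buckets += get_chunks(dict[key], batch_size)
  d.keys.foldl (fun buckets key => buckets ++ pvGetChunks (d.getD key []) batch_size) []

-- ===== PORT B =====
def bin_data_into_buckets_alt (data : List (List (List Int))) (batch_size : Int) : List (List (List (List Int))) :=
  -- pass 1: distinct lengths in first-appearance order (seen set + order list)
  let so : PySem.Set Int × List Int :=
    data.foldl (fun so item =>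
      if PySem.Set.contains so.1 (pvKey item) then so
      else (PySem.Set.add so.1 (pvKey item), so.2 ++ [pvKey item]))
      (PySem.Set.empty, [])
  -- pass 2: per length, filter the group and chunk it with range(0, len(group), batch_size)
  so.2.foldl (fun buckets length =>
    let group := data.filter (fun item => pvKey item == length)
    buckets ++ (PySem.List.pyRange 0 (group.length : Int) batch_size).map
      (fun i => PySem.List.slice group (some i) (some (i + batch_size)))) []

-- ===== PRECONDITION & SPEC =====
-- Pre_ excludes exactly the inputs on which A raises: an empty item (IndexError on item[0]),
-- and batch_size = 0 with nonempty data (ValueError from range(0, len, 0)).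
def Pre_bin_data_into_buckets (data : List (List (List Int))) (batch_size : Int) : Prop :=
  (data = [] ∨ batch_size ≠ 0) ∧ ∀ item ∈ data, item ≠ []
instance (data : List (List (List Int))) (batch_size : Int) : Decidable (Pre_bin_data_into_buckets data batch_size) := by unfold Pre_bin_data_into_buckets; infer_instance

def pvWitness_bin_data_into_buckets : List (List (List Int)) × Int :=
  ([[[1], [9]], [[2, 3], [9]], [[4], [8]]], 2)

def Spec_bin_data_into_buckets (data : List (List (List Int))) (batch_size : Int) (out : List (List (List (List Int)))) : Prop := out = bin_data_into_buckets_alt data batch_size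
instance (data : List (List (List Int))) (batch_size : Int) (out : List (List (List (List Int)))) : Decidable (Spec_bin_data_into_buckets data batch_size out) := by unfold Spec_bin_data_into_buckets; infer_instance

-- ===== CLAIM (what is proved, stated in full; the proofs are below) =====
def Claim_equal_bin_data_into_buckets : Prop := ∀ (data : List (List (List Int))) (batch_size : Int), Dom_bin_data_into_buckets data batch_size → Pre_bin_data_into_buckets data batch_size → Spec_bin_data_into_buckets data batch_size (bin_data_into_buckets data batch_size)

-- ===== LEMMAS AND PROOFS =====

-- keys of A's grouping fold = folding Set.add over the item keys
theorem pvKeys_foldl (data : List (List (List Int))) :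
    ∀ d : PySem.Dict Int (List (List (List Int))),
      (data.foldl pvStep d).keys = data.foldl (fun s it => PySem.Set.add s (pvKey it)) d.keys := by
  induction data with
  | nil => intro d; rfl
  | cons item rest ih =>
    intro d
    simp only [List.foldl_cons]
    rw [ih]
    congr 1
    by_cases h : d.contains (pvKey item)
    · have hg : (d.get? (pvKey item)).isSome := by
        rwa [← PySem.Dict.contains_eq_isSome_get?]
      obtain ⟨xs, hxs⟩ := Option.isSome_iff_exists.mp hg
      simp only [pvStep, hxs]
      rw [PySem.Dict.keys_insert_of_contains d _ h,
        PySem.Set.add_of_mem ((PySem.Dict.contains_iff_mem_keys d _).mp h)]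
    · have hg : d.get? (pvKey item) = none := by
        rcases hn : d.get? (pvKey item) with _ | xs
        · rfl
        · exact absurd (by rw [PySem.Dict.contains_eq_isSome_get?, hn]; rfl) h
      simp only [pvStep, hg]
      rw [PySem.Dict.keys_insert_of_not_contains d _ (by simpa using h),
        PySem.Set.add_of_not_mem (fun hm => h ((PySem.Dict.contains_iff_mem_keys d _).mpr hm))]

-- values of A's grouping fold = filter by key
theorem pvGetD_foldl (data : List (List (List Int))) :
    ∀ (d : PySem.Dict Int (List (List (List Int)))) (k : Int),
      (data.foldl pvStep d).getD k [] = d.getD k [] ++ data.filter (fun it => pvKey it == k) := by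
  induction data with
  | nil => intro d k; simp
  | cons item rest ih =>
    intro d k
    simp only [List.foldl_cons, List.filter_cons]
    rw [ih]
    by_cases hk : pvKey item = k
    · subst hk
      simp only [beq_self_eq_true, if_pos]
      have hstep : (pvStep d item).getD (pvKey item) [] = d.getD (pvKey item) [] ++ [item] := by
        unfold pvStep
        rcases hg : d.get? (pvKey item) with _ | xs
        · rw [PySem.Dict.getD_insert_self, PySem.Dict.getD_of_get?_eq_none d _ hg]; rfl
        · rw [PySem.Dict.getD_insert_self, PySem.Dict.getD_of_get?_eq_some d _ hg]
      rw [hstep, List.append_assoc]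
      rfl
    · have hne : (pvKey item == k) = false := by simpa using hk
      simp only [hne, Bool.false_eq_true, if_neg, not_false_iff]
      have hstep : (pvStep d item).getD k [] = d.getD k [] := by
        unfold pvStep
        rcases hg : d.get? (pvKey item) with _ | xs <;>
          rw [PySem.Dict.getD_insert_of_ne d _ _ (Ne.symm hk)]
      rw [hstep]

-- B's pass-1 keeps seen = order; the order list is the same Set.add fold.
theorem pvOrder_foldl (data : List (List (List Int))) :
    ∀ s : PySem.Set Int,
      (data.foldl (fun so item =>
          if PySem.Set.contains so.1 (pvKey item) then so
          else (PySem.Set.add so.1 (pvKey item), so.2 ++ [pvKey item]))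
        (s, (s : List Int))).2
      = data.foldl (fun t it => PySem.Set.add t (pvKey it)) s := by
  induction data with
  | nil => intro s; rfl
  | cons item rest ih =>
    intro s
    simp only [List.foldl_cons]
    by_cases h : pvKey item ∈ s
    · have hc : PySem.Set.contains s (pvKey item) = true := (PySem.Set.contains_iff s _).mpr h
      simp only [hc, if_pos, PySem.Set.add_of_mem h]
      exact ih s
    · have hc : PySem.Set.contains s (pvKey item) = false := by
        rcases hb : PySem.Set.contains s (pvKey item) with _ | _
        · rfl
        · exact absurd ((PySem.Set.contains_iff s _).mp hb) h
      simp only [hc, Bool.false_eq_true, if_neg, not_false_iff]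
      rw [PySem.Set.add_of_not_mem h]
      exact ih (s ++ [pvKey item])

-- ===== VERDICT (by name: the statement is the Claim_ definition above) =====
theorem bin_data_into_buckets_spec : Claim_equal_bin_data_into_buckets := by
  intro data batch_size _ _
  unfold Spec_bin_data_into_buckets bin_data_into_buckets bin_data_into_buckets_alt
  have hso := pvOrder_foldl data PySem.Set.empty
  have hkeys := pvKeys_foldl data PySem.Dict.empty
  have hget := pvGetD_foldl data PySem.Dict.empty
  have e : (PySem.Set.empty : PySem.Set Int) = ([] : List Int) := rfl
  rw [e] at hso
  have ek : (PySem.Dict.empty : PySem.Dict Int (List (List (List Int)))).keys = ([] : List Int) := rfl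
  rw [ek] at hkeys
  simp only [e]
  rw [hkeys, ← hso]
  have hf : (fun (buckets : List (List (List (List Int)))) (key : Int) =>
        buckets ++ pvGetChunks ((data.foldl pvStep PySem.Dict.empty).getD key []) batch_size)
      = (fun (buckets : List (List (List (List Int)))) (length : Int) =>
        buckets ++ (PySem.List.pyRange 0 ((data.filter (fun item => pvKey item == length)).length : Int) batch_size).map
          (fun i => PySem.List.slice (data.filter (fun item => pvKey item == length)) (some i) (some (i + batch_size)))) := by
    funext buckets key
    rw [hget]
    simp only [PySem.Dict.getD_empty, List.nil_append]
    rfl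
  rw [hf]
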